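-- pv_equiv track=rewrite | github.com/pkemkes/advent-of-code | 2022/21/solution.py | split_at_operator
-- ===== SOURCE A (Python) =====
-- from typing import List, Tuple, Dict
--
-- def split_at_operator(math: str) -> List[str]:
--     parantheses = 0
--     splitted = ["" for _ in range(3)]
--     pos = 0
--     for c in math:
--         if c in "()":
--             parantheses += 1 if c == "(" else -1
--         if pos == 0 and parantheses == 0 and c in "+-/* ":
--             pos = 1
--         elif pos == 1 and (c.isnumeric() or c in "(x"):
--             pos = 2
--         splitted[pos] += c
--     return splitted
-- ===== SOURCE B (Python) =====
-- def split_at_operator(math):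
--     # find i = first index with paren depth 0 (after updating for this char) and char an operator/space
--     depth = 0
--     i = -1
--     for k, c in enumerate(math):
--         if c == '(':
--             depth += 1
--         elif c == ')':
--             depth -= 1
--         if depth == 0 and c in "+-/* ":
--             i = k
--             break
--     if i == -1:
--         return [math, "", ""]
--     # find j = first index after i where the second operand starts
--     j = len(math)
--     for k in range(i + 1, len(math)):
--         if math[k].isnumeric() or math[k] in "(x":
--             j = k
--             break
--     return [math[:i], math[i:j], math[j:]]
-- ===== Notes on version B (the rewrite author's own statement) =====
-- stated objective: faster
-- what changed: Replaced A's single-pass three-way position state machine (appending each char to splitted[pos], quadratic string concatenation) by two index searches (first depth-0 operator index, then the start of the second operand) followed by three slices.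
import Mathlib
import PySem

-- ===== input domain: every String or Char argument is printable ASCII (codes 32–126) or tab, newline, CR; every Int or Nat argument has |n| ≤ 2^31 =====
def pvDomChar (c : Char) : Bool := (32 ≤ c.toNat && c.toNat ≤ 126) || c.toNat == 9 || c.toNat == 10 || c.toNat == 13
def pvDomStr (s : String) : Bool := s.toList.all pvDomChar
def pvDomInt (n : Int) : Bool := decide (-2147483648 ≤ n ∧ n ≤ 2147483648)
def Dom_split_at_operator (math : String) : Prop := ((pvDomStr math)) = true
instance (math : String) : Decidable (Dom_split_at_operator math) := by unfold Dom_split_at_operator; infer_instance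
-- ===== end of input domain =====

-- B replaces A's per-char three-way state machine by two index searches (operator index, second-operand
-- start) followed by three slices; objective: faster (no per-char string concatenation). (Python `isnumeric` is ported as
-- `PySem.Chars.isdigit`, exact on the printable-ASCII domain.)

-- ===== PORT A =====
-- state: parentheses counter, the three accumulated pieces, pos; char appended to piece `pos`
def splitA_go (par : Int) (s0 s1 s2 : List Char) (pos : Nat) : List Char → List Char × List Char × List Char
  | [] => (s0, s1, s2)
  | c :: t =>
    let par := if c = '(' ∨ c = ')' then (if c = '(' then par + 1 else par - 1) else par
    let pos := if pos = 0 ∧ par = 0 ∧ c ∈ ['+', '-', '/', '*', ' '] then 1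
               else if pos = 1 ∧ (PySem.Chars.isdigit c ∨ c ∈ ['(', 'x']) then 2
               else pos
    if pos = 0 then splitA_go par (s0 ++ [c]) s1 s2 pos t
    else if pos = 1 then splitA_go par s0 (s1 ++ [c]) s2 pos t
    else splitA_go par s0 s1 (s2 ++ [c]) pos t

def split_at_operator (math : String) : List String :=
  let r := splitA_go 0 [] [] [] 0 math.toList
  [String.ofList r.1, String.ofList r.2.1, String.ofList r.2.2]

-- ===== PORT B =====
-- index (relative) of the first depth-0 operator/space char, tracking parenthesis depth
def findOp (par : Int) : List Char → Option Nat
  | [] => none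
  | c :: t =>
    let par := if c = '(' then par + 1 else if c = ')' then par - 1 else par
    if par = 0 ∧ c ∈ ['+', '-', '/', '*', ' '] then some 0
    else (findOp par t).map (· + 1)

-- index (relative) of the first char starting the second operand
def findStart : List Char → Option Nat
  | [] => none
  | c :: t =>
    if PySem.Chars.isdigit c ∨ c ∈ ['(', 'x'] then some 0
    else (findStart t).map (· + 1)

-- the three Python slices math[:i], math[i:j], math[j:] (indices are nonnegative and ≤ len, so
-- they are exactly take/drop)
def split_at_operator_alt (math : String) : List String :=
  let l := math.toList
  match findOp 0 l with
  | none => [math, "", ""]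
  | some i =>
    let rest := l.drop (i + 1)
    let j := (findStart rest).getD rest.length
    [String.ofList (l.take i), String.ofList ((l.drop i).take (1 + j)), String.ofList (l.drop (i + 1 + j))]

-- ===== PRECONDITION & SPEC =====
def Spec_split_at_operator (math : String) (out : List String) : Prop := out = split_at_operator_alt math
instance (math : String) (out : List String) : Decidable (Spec_split_at_operator math out) := by unfold Spec_split_at_operator; infer_instance

-- ===== CLAIM (what is proved, stated in full; the proofs are below) =====
def Claim_equal_split_at_operator : Prop := ∀ (math : String), Dom_split_at_operator math → Spec_split_at_operator math (split_at_operator math)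

-- ===== LEMMAS AND PROOFS =====

theorem take_one_add {α : Type} (n : ℕ) (c : α) (t : List α) :
    List.take (1 + n) (c :: t) = c :: List.take n t := by
  rw [Nat.add_comm]; simp

theorem drop_one_add {α : Type} (n : ℕ) (c : α) (t : List α) :
    List.drop (1 + n) (c :: t) = List.drop n t := by
  rw [Nat.add_comm]; simp

theorem splitA_go_two (l : List Char) : ∀ (par : Int) (s0 s1 s2 : List Char),
    splitA_go par s0 s1 s2 2 l = (s0, s1, s2 ++ l) := by
  induction l with
  | nil => intro par s0 s1 s2; simp [splitA_go]
  | cons c t ih =>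
    intro par s0 s1 s2
    simp [splitA_go, ih]

theorem splitA_go_one (l : List Char) : ∀ (par : Int) (s0 s1 s2 : List Char),
    splitA_go par s0 s1 s2 1 l =
      match findStart l with
      | none => (s0, s1 ++ l, s2)
      | some j => (s0, s1 ++ l.take j, s2 ++ l.drop j) := by
  induction l with
  | nil => intro par s0 s1 s2; simp [splitA_go, findStart]
  | cons c t ih =>
    intro par s0 s1 s2
    by_cases h : PySem.Chars.isdigit c = true ∨ c = '(' ∨ c = 'x'
    · simp [splitA_go, findStart, h, splitA_go_two]
    · simp only [splitA_go, findStart]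
      simp only [h, List.mem_cons, List.not_mem_nil, or_false]
      simp [ih]
      cases findStart t <;> simp

theorem parUpdate_eq (c : Char) (par : Int) :
    (if c = '(' ∨ c = ')' then (if c = '(' then par + 1 else par - 1) else par) =
      (if c = '(' then par + 1 else if c = ')' then par - 1 else par) := by
  by_cases h1 : c = '(' <;> by_cases h2 : c = ')' <;> simp [h1, h2]

theorem splitA_go_zero (l : List Char) : ∀ (par : Int) (s0 : List Char),
    splitA_go par s0 [] [] 0 l =
      match findOp par l with
      | none => (s0 ++ l, [], [])
      | some i =>
        match findStart (l.drop (i + 1)) with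
        | none => (s0 ++ l.take i, l.drop i, [])
        | some j => (s0 ++ l.take i, (l.drop i).take (1 + j), l.drop (i + 1 + j)) := by
  induction l with
  | nil => intro par s0; simp [splitA_go, findOp]
  | cons c t ih =>
    intro par s0
    by_cases hop : (if c = '(' then par + 1 else if c = ')' then par - 1 else par) = 0 ∧
        (c = '+' ∨ c = '-' ∨ c = '/' ∨ c = '*' ∨ c = ' ')
    · simp only [splitA_go, findOp, parUpdate_eq]
      simp [hop.1, hop.2, splitA_go_one]
      cases findStart t <;> simp [take_one_add, drop_one_add]
    · have step : splitA_go par s0 [] [] 0 (c :: t) =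
          splitA_go (if c = '(' then par + 1 else if c = ')' then par - 1 else par) (s0 ++ [c]) [] [] 0 t := by
        simp only [splitA_go, parUpdate_eq, List.mem_cons, List.not_mem_nil, or_false, true_and]
        rw [if_neg hop]
        simp
      rw [step, ih]
      simp only [findOp]
      rw [if_neg (show ¬((if c = '(' then par + 1 else if c = ')' then par - 1 else par) = 0 ∧
        c ∈ ['+', '-', '/', '*', ' ']) from by simpa using hop)]
      cases hfo : findOp (if c = '(' then par + 1 else if c = ')' then par - 1 else par) t with
      | none => simp
      | some i =>
        simp only [Option.map_some]
        cases hfs : findStart (List.drop (i + 1) t) with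
        | none => simp [List.drop_succ_cons, List.take_succ_cons, hfs]
        | some j =>
          simp only [List.drop_succ_cons, List.take_succ_cons, hfs]
          rw [show i + 1 + 1 + j = (i + 1 + j) + 1 from by omega, List.drop_succ_cons]
          simp

theorem findOp_lt (l : List Char) : ∀ (par : Int) (i : Nat), findOp par l = some i → i < l.length := by
  induction l with
  | nil => intro par i h; simp [findOp] at h
  | cons c t ih =>
    intro par i h
    simp only [findOp] at h
    by_cases h1 : ((if c = '(' then par + 1 else if c = ')' then par - 1 else par) = 0 ∧
        c ∈ ['+', '-', '/', '*', ' '])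
    · rw [if_pos h1] at h
      simp at h
      simp [← h]
    · rw [if_neg h1] at h
      cases hfo : findOp (if c = '(' then par + 1 else if c = ')' then par - 1 else par) t with
      | none => rw [hfo] at h; simp at h
      | some k => rw [hfo] at h; simp at h; have := ih _ _ hfo; simp; omega

theorem split_at_operator_spec : Claim_equal_split_at_operator := by
  intro math _
  simp only [Spec_split_at_operator, split_at_operator, split_at_operator_alt]
  rw [splitA_go_zero]
  cases hfo : findOp 0 math.toList with
  | none => simp
  | some i =>
    have hlt : i < math.toList.length := findOp_lt _ _ _ hfo
    cases hfs : findStart (List.drop (i + 1) math.toList) with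
    | some j => simp [hfs]
    | none =>
      have hlen : math.length = math.toList.length := String.length_toList.symm
      have h1 : (math.toList.drop i).take (1 + (math.length - (i + 1))) =
          math.toList.drop i := by
        apply List.take_of_length_le
        rw [List.length_drop]; omega
      have h2 : math.toList.drop (i + 1 + (math.length - (i + 1))) = ([] : List Char) := by
        apply List.drop_eq_nil_of_le
        omega
      simp [hfs, h1, h2]
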